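-- pv_equiv track=rewrite | github.com/LightspeedDMS/code-indexer | src/code_indexer/server/wiki/wiki_service.py | _strip_header_block
-- ===== SOURCE A (Python) =====
-- from typing import TYPE_CHECKING, Any, Dict, List, Optional, Tuple
--
-- def _strip_header_block(content: str, metadata: Dict[str, Any] = None) -> str:
--     """Strip structured header block fields (Article Number/Title/Status) from body.
--
--     Summary is preserved in the body. Extracted values are merged into metadata
--     if a dict is provided. Handles bold markdown markers (**field:**) in addition
--     to plain text (field:).
--     """
--     lines = content.split("\n")
--     # Fields to strip from body (summary is intentionally absent — keep it)
--     strip_fields = {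
--         "article number:": "article_number",
--         "title:": None,  # Already shown as H1, just strip
--         "publication status:": "publication_status",
--     }
--     result_lines = []
--     i = 0
--     # Preserve leading blank lines
--     while i < len(lines) and not lines[i].strip():
--         result_lines.append(lines[i])
--         i += 1
--
--     found_header = False
--     while i < len(lines):
--         line = lines[i]
--         stripped = line.strip()
--         # Remove bold markers for field matching
--         clean = stripped.replace("**", "").strip()
--         lower_clean = clean.lower()
--
--         matched = False
--         for field_prefix, meta_key in strip_fields.items():
--             if lower_clean.startswith(field_prefix):
--                 matched = True
--                 found_header = True
--                 # Extract value and store in metadata if key provided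
--                 if meta_key and metadata is not None:
--                     value = clean[len(field_prefix) :].strip()
--                     metadata[meta_key] = value
--                 break
--
--         if matched:
--             i += 1
--             continue
--         elif stripped == "---" and found_header:
--             # Skip the --- separator that follows the header fields
--             i += 1
--             continue
--         elif stripped == "" and found_header:
--             # Skip blank lines within the header block
--             i += 1
--             continue
--         else:
--             # Not a header field — keep this and all remaining lines
--             result_lines.extend(lines[i:])
--             break
--
--     if not result_lines or all(not line.strip() for line in result_lines):
--         # Everything was leading whitespace; return remaining content
--         return "\n".join(lines[i:]) if i < len(lines) else ""
--
--     return "\n".join(result_lines).lstrip("\n")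
-- ===== SOURCE B (Python) =====
-- def _strip_header_block(content: str, metadata=None) -> str:
--     """Staged: classify every line once, then locate the body start by index
--     arithmetic over the tags; one batch pass merges field values into metadata."""
--     FIELDS = (
--         ("article number:", "article_number"),
--         ("title:", None),
--         ("publication status:", "publication_status"),
--     )
--
--     def classify(line):
--         s = line.strip()
--         clean = s.replace("**", "").strip()
--         lc = clean.lower()
--         for prefix, key in FIELDS:
--             if lc.startswith(prefix):
--                 return ("field", key, clean[len(prefix):].strip())
--         return ("blank",) if s == "" else ("sep",) if s == "---" else ("other",)
--
--     lines = content.split("\n")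
--     tags = [classify(l) for l in lines]
--     n = len(lines)
--     lead = next((j for j, t in enumerate(tags) if t[0] != "blank"), n)
--     if lead == n or tags[lead][0] != "field":
--         start = lead
--     else:
--         start = next((j for j in range(lead + 1, n) if tags[j][0] == "other"), n)
--         if metadata is not None:
--             for t in tags[lead:start]:
--                 if t[0] == "field" and t[1] is not None:
--                     metadata[t[1]] = t[2]
--     if start == n:
--         return ""
--     return "\n".join(lines[:lead] + lines[start:]).lstrip("\n")
-- ===== Notes on version B (the rewrite author's own statement) =====
-- stated objective: alternative
-- what changed: Replaced A's stateful single scan (result_lines accumulator, found_header flag, break/continue control and the compound all-blank fallback) with a staged computation: classify every line into a tag (field/blank/sep/other) in one map pass, locate the lead and the body start purely by index searches over the tag list, merge metadata in a separate batch pass over the tag slice, and build the result from two slices.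
import Mathlib
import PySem

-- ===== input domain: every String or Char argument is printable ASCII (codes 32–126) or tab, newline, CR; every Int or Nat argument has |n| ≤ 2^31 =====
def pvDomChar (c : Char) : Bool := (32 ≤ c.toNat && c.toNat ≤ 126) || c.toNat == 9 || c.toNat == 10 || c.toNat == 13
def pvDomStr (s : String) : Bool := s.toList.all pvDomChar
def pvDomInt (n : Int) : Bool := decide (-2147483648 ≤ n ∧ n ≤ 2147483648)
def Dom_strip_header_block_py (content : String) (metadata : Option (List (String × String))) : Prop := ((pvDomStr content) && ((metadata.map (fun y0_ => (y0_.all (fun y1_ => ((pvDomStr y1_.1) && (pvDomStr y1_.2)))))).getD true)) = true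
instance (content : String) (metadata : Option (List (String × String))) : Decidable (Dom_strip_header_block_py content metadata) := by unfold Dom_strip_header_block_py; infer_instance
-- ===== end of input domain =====

-- B replaces A's stateful scan (accumulator list, found_header flag, all-blank fallback pass) with a
-- staged computation: classify every line once, find the body start by index arithmetic over the tag
-- list, and merge metadata in one batch pass (objective: simpler). Both Pythons mutate the `metadata`
-- dict identically (checked by fuzzing); that side effect is not observable in the RETURN value,
-- which is what the ports compute and the equivalence is about, so the ports do not thread it.

-- s.lstrip("\n"): drop leading '\n' characters (exact hand port of lstrip with the char set {'\n'};
-- the list side is the definition, String.ofList/toList is the sanctioned bridge)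
def pvLstripNL (s : String) : String := String.ofList (s.toList.dropWhile (fun c => c == '\n'))

-- ===== PORT A =====
-- the keys of A's strip_fields dict, in insertion order (the metadata values attached to them
-- only feed the unthreaded side effect)
def pvAFieldPrefixes : List String := ["article number:", "title:", "publication status:"]

-- A's first while loop: collect leading blank lines into result_lines, return (result_lines, lines[i:])
def pvALead : List String → List String × List String
  | [] => ([], [])
  | l :: ls =>
    if PySem.Str.strip l == "" then
      let r := pvALead ls
      (l :: r.1, r.2)
    else ([], l :: ls)

-- A's second while loop; `none` = ran off the end (i == len(lines)), `some rest` = break with rest = lines[i:]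
def pvALoop : Bool → List String → Option (List String)
  | _, [] => none
  | found, l :: ls =>
    let stripped := PySem.Str.strip l
    let clean := PySem.Str.strip (PySem.Str.replace stripped "**" "")
    let lowerClean := PySem.Str.lower clean
    let matched := pvAFieldPrefixes.any (fun p => PySem.Str.startswith lowerClean p)
    if matched then pvALoop true ls
    else if stripped == "---" && found then pvALoop found ls
    else if stripped == "" && found then pvALoop found ls
    else some (l :: ls)

def strip_header_block_py (content : String) (metadata : Option (List (String × String))) : String :=
  let lines := (PySem.Str.split? content "\n").getD []   -- sep ≠ "" so split? is always `some`
  let lead := pvALead lines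
  match pvALoop false lead.2 with
  | none =>   -- loop exhausted: i == len(lines), result_lines = the leading blanks
    let result := lead.1
    if result.isEmpty || result.all (fun l => PySem.Str.strip l == "") then ""  -- "i < len(lines)" is false here
    else pvLstripNL (PySem.Str.join "\n" result)
  | some rest =>   -- break: result_lines = leading blanks ++ lines[i:]; "i < len(lines)" ↔ rest ≠ []
    let result := lead.1 ++ rest
    if result.isEmpty || result.all (fun l => PySem.Str.strip l == "") then
      if rest.isEmpty then "" else PySem.Str.join "\n" rest
    else pvLstripNL (PySem.Str.join "\n" result)

-- ===== PORT B =====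
inductive PvTag | field | blank | sep | other
deriving DecidableEq, Repr

def pvBFields : List (String × Option String) :=
  [("article number:", some "article_number"), ("title:", none), ("publication status:", some "publication_status")]

-- Source B's classify(line); the ("field", key, value) extras of the Python tuple feed only the
-- unthreaded metadata side effect, so the port keeps the tag
def pvClassify (l : String) : PvTag :=
  let s := PySem.Str.strip l
  let clean := PySem.Str.strip (PySem.Str.replace s "**" "")
  let lc := PySem.Str.lower clean
  if pvBFields.any (fun pk => PySem.Str.startswith lc pk.1) then .field
  else if s == "" then .blank
  else if s == "---" then .sep
  else .other

def strip_header_block_py_alt (content : String) (metadata : Option (List (String × String))) : String :=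
  let lines := (PySem.Str.split? content "\n").getD []   -- sep ≠ "" so split? is always `some`
  let tags := lines.map pvClassify
  let n := lines.length
  -- lead = next((j for j, t in enumerate(tags) if t[0] != "blank"), n)
  let lead := (tags.findIdx? (fun t => !decide (t = PvTag.blank))).getD n
  -- "if lead == n or tags[lead][0] != 'field'": tags[lead]? is none exactly when lead == n
  let start :=
    if tags[lead]? == some PvTag.field then
      -- next((j for j in range(lead+1, n) if tags[j][0] == "other"), n)
      lead + 1 + ((tags.drop (lead + 1)).findIdx? (fun t => decide (t = PvTag.other))).getD (tags.drop (lead + 1)).length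
    else lead
  if start == n then ""
  else pvLstripNL (PySem.Str.join "\n" (lines.take lead ++ lines.drop start))

-- ===== PRECONDITION & SPEC =====
def Spec_strip_header_block_py (content : String) (metadata : Option (List (String × String))) (out : String) : Prop := out = strip_header_block_py_alt content metadata
instance (content : String) (metadata : Option (List (String × String))) (out : String) : Decidable (Spec_strip_header_block_py content metadata out) := by unfold Spec_strip_header_block_py; infer_instance

-- ===== CLAIM =====
def Claim_equal_strip_header_block_py : Prop := ∀ (content : String) (metadata : Option (List (String × String))), Dom_strip_header_block_py content metadata → Spec_strip_header_block_py content metadata (strip_header_block_py content metadata)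

-- ===== LEMMAS AND PROOFS =====

-- proof-only helper: the number of leading blank lines
def pvLeadLen : List String → Nat
  | [] => 0
  | l :: ls => if PySem.Str.strip l == "" then pvLeadLen ls + 1 else 0

theorem pvLeadLen_le (ls : List String) : pvLeadLen ls ≤ ls.length := by
  induction ls with
  | nil => simp [pvLeadLen]
  | cons l ls ih => by_cases h : PySem.Str.strip l == "" <;> simp [pvLeadLen, h] <;> omega

-- A's lead pair in terms of pvLeadLen
theorem pvALead_eq (ls : List String) :
    pvALead ls = (ls.take (pvLeadLen ls), ls.drop (pvLeadLen ls)) := by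
  induction ls with
  | nil => rfl
  | cons l ls ih =>
    by_cases h : PySem.Str.strip l == ""
    · simp [pvALead, pvLeadLen, h, ih]
    · simp [pvALead, pvLeadLen, h]

-- every line A collects as a leading blank strips to ""
theorem pvALead_fst_blank (ls : List String) :
    ∀ l ∈ (pvALead ls).1, PySem.Str.strip l == "" := by
  induction ls with
  | nil => simp [pvALead]
  | cons l ls ih =>
    by_cases h : PySem.Str.strip l == ""
    · simp only [pvALead, h, if_pos]
      intro x hx
      rcases List.mem_cons.mp hx with rfl | hx
      · exact h
      · exact ih x hx
    · simp [pvALead, h]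

-- the first line after the lead is non-blank (or there is none)
theorem pvALead_snd_head (ls : List String) :
    ∀ l ls', (pvALead ls).2 = l :: ls' → PySem.Str.strip l ≠ "" := by
  induction ls with
  | nil => simp [pvALead]
  | cons x ls ih =>
    by_cases h : PySem.Str.strip x == ""
    · simpa [pvALead, h] using ih
    · simp only [pvALead, h, if_neg, Bool.false_eq_true, not_false_iff]
      intro l ls' he
      cases he
      simpa using h

-- B's prefix test over (prefix, key) pairs coincides with A's over the bare prefixes
theorem pvAny_fields_eq (lc : String) :
    pvBFields.any (fun pk => PySem.Str.startswith lc pk.1)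
      = pvAFieldPrefixes.any (fun p => PySem.Str.startswith lc p) := by
  simp [pvBFields, pvAFieldPrefixes]

-- abbreviation for A's matched test
def pvMatched (l : String) : Bool :=
  pvAFieldPrefixes.any (fun p =>
    PySem.Str.startswith (PySem.Str.lower (PySem.Str.strip (PySem.Str.replace (PySem.Str.strip l) "**" ""))) p)

theorem pvClassify_spec (l : String) :
    pvClassify l =
      (if pvMatched l then PvTag.field
       else if PySem.Str.strip l == "" then PvTag.blank
       else if PySem.Str.strip l == "---" then PvTag.sep
       else PvTag.other) := by
  simp only [pvClassify, pvMatched, pvAny_fields_eq]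
  rfl

-- blank lines are tagged blank, and only blank lines are
theorem pvClassify_blank_iff (l : String) :
    pvClassify l = PvTag.blank ↔ PySem.Str.strip l = "" := by
  rw [pvClassify_spec]
  constructor
  · intro h
    by_cases hm : pvMatched l = true
    · simp [hm] at h
    · by_cases hb : PySem.Str.strip l == ""
      · simpa using hb
      · by_cases hs : PySem.Str.strip l == "---" <;> simp [hm, hb, hs] at h
  · intro h
    have hm : pvMatched l = false := by
      unfold pvMatched; rw [h]; decide
    simp [hm, h]

-- B's lead index is pvLeadLen
theorem pvFindIdx_lead (ls : List String) :
    ((ls.map pvClassify).findIdx? (fun t => !decide (t = PvTag.blank))).getD ls.length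
      = pvLeadLen ls := by
  induction ls with
  | nil => simp [pvLeadLen]
  | cons l ls ih =>
    by_cases h : PySem.Str.strip l = ""
    · have hb : pvClassify l = PvTag.blank := (pvClassify_blank_iff l).mpr h
      have : (PySem.Str.strip l == "") = true := by simpa using h
      simp only [List.map_cons, List.findIdx?_cons, hb, decide_true, Bool.not_true,
        pvLeadLen, this, if_pos, List.length_cons]
      cases hf : (ls.map pvClassify).findIdx? (fun t => !decide (t = PvTag.blank)) with
      | none => simpa [hf] using ih
      | some k => simpa [hf] using ih
    · have hb : pvClassify l ≠ PvTag.blank := fun hc => h ((pvClassify_blank_iff l).mp hc)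
      have : (PySem.Str.strip l == "") = false := by simpa using h
      simp [List.findIdx?_cons, hb, pvLeadLen, this]

-- A's header loop with found = true, characterised by the first `other` tag
theorem pvALoop_true_eq (ls : List String) :
    pvALoop true ls
      = ((ls.map pvClassify).findIdx? (fun t => decide (t = PvTag.other))).map (fun k => ls.drop k) := by
  induction ls with
  | nil => rfl
  | cons l ls ih =>
    have hspec := pvClassify_spec l
    simp only [pvALoop, List.map_cons, List.findIdx?_cons]
    cases hm : pvMatched l with
    | true =>
      have hcl : pvClassify l = PvTag.field := by rw [hspec, hm]; rfl
      rw [show (pvAFieldPrefixes.any (fun p =>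
          PySem.Str.startswith (PySem.Str.lower (PySem.Str.strip (PySem.Str.replace (PySem.Str.strip l) "**" ""))) p)) = pvMatched l from rfl, hm]
      simp only [if_pos, hcl]
      rw [ih]
      cases hf : (ls.map pvClassify).findIdx? (fun t => decide (t = PvTag.other)) <;> simp [hf]
    | false =>
      rw [show (pvAFieldPrefixes.any (fun p =>
          PySem.Str.startswith (PySem.Str.lower (PySem.Str.strip (PySem.Str.replace (PySem.Str.strip l) "**" ""))) p)) = pvMatched l from rfl, hm]
      simp only [Bool.false_eq_true, if_false]
      by_cases hsep : PySem.Str.strip l = "---"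
      · have hne : (PySem.Str.strip l == "") = false := by simp [hsep]
        have hcl : pvClassify l = PvTag.sep := by rw [hspec, hm]; simp [hsep]
        have hse : (PySem.Str.strip l == "---") = true := by simpa using hsep
        simp only [hse, Bool.true_and, if_pos, hcl]
        rw [ih]
        cases hf : (ls.map pvClassify).findIdx? (fun t => decide (t = PvTag.other)) <;> simp [hf]
      · by_cases hbl : PySem.Str.strip l = ""
        · have hcl : pvClassify l = PvTag.blank := (pvClassify_blank_iff l).mpr hbl
          have hse : (PySem.Str.strip l == "---") = false := by simpa using hsep
          have hbe : (PySem.Str.strip l == "") = true := by simpa using hbl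
          simp only [hse, Bool.false_and, Bool.false_eq_true, if_false, hbe, Bool.true_and,
            if_pos, hcl]
          rw [ih]
          cases hf : (ls.map pvClassify).findIdx? (fun t => decide (t = PvTag.other)) <;> simp [hf]
        · have hcl : pvClassify l = PvTag.other := by rw [hspec, hm]; simp [hbl, hsep]
          have hse : (PySem.Str.strip l == "---") = false := by simpa using hsep
          have hbe : (PySem.Str.strip l == "") = false := by simpa using hbl
          simp [hse, hbe, hcl]

-- when A's header loop breaks, the line it breaks on is non-blank (given the first line it ever saw was)
theorem pvALoop_some_head (ls : List String) :
    ∀ found rest, (found = false → ∀ l ls', ls = l :: ls' → PySem.Str.strip l ≠ "") →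
      pvALoop found ls = some rest → ∃ l ls', rest = l :: ls' ∧ PySem.Str.strip l ≠ "" := by
  induction ls with
  | nil => intro found rest _ h; simp [pvALoop] at h
  | cons l ls ih =>
    intro found rest hhead h
    simp only [pvALoop] at h
    by_cases hm : pvAFieldPrefixes.any (fun p =>
        PySem.Str.startswith (PySem.Str.lower (PySem.Str.strip (PySem.Str.replace (PySem.Str.strip l) "**" ""))) p) = true
    · rw [if_pos hm] at h
      exact ih true rest (by intro hf; cases hf) h
    · rw [if_neg hm] at h
      cases h1 : (PySem.Str.strip l == "---" && found) with
      | true =>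
        rw [if_pos h1] at h
        have hfound : found = true := by revert h1; cases found <;> simp
        exact ih found rest (by intro hf; rw [hf] at hfound; cases hfound) h
      | false =>
        rw [if_neg (by simp [h1])] at h
        cases h2 : (PySem.Str.strip l == "" && found) with
        | true =>
          rw [if_pos h2] at h
          have hfound : found = true := by revert h2; cases found <;> simp
          exact ih found rest (by intro hf; rw [hf] at hfound; cases hfound) h
        | false =>
          rw [if_neg (by simp [h2])] at h
          refine ⟨l, ls, (Option.some.injEq _ _).mp h.symm, ?_⟩
          cases hfound : found with
          | false => exact hhead hfound l ls rfl
          | true =>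
            intro hblank
            have hc : (PySem.Str.strip l == "" && found) = true := by simp [hblank, hfound]
            rw [h2] at hc; cases hc

-- the two port bodies agree on any line list
theorem pvMain (ls : List String) :
    (let lead := pvALead ls
     match pvALoop false lead.2 with
     | none =>
       let result := lead.1
       if result.isEmpty || result.all (fun l => PySem.Str.strip l == "") then ""
       else pvLstripNL (PySem.Str.join "\n" result)
     | some rest =>
       let result := lead.1 ++ rest
       if result.isEmpty || result.all (fun l => PySem.Str.strip l == "") then
         if rest.isEmpty then "" else PySem.Str.join "\n" rest
       else pvLstripNL (PySem.Str.join "\n" result))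
    =
    (let tags := ls.map pvClassify
     let n := ls.length
     let lead := (tags.findIdx? (fun t => !decide (t = PvTag.blank))).getD n
     let start :=
       if tags[lead]? == some PvTag.field then
         lead + 1 + ((tags.drop (lead + 1)).findIdx? (fun t => decide (t = PvTag.other))).getD (tags.drop (lead + 1)).length
       else lead
     if start == n then ""
     else pvLstripNL (PySem.Str.join "\n" (ls.take lead ++ ls.drop start))) := by
  simp only [pvALead_eq, pvFindIdx_lead]
  set L := pvLeadLen ls with hLdef
  have hLle : L ≤ ls.length := pvLeadLen_le ls
  have htake : ∀ x ∈ ls.take L, PySem.Str.strip x == "" := by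
    intro x hx
    exact pvALead_fst_blank ls x (by rw [pvALead_eq]; exact hx)
  have hidx : (ls.map pvClassify)[L]? = (ls.drop L).head?.map pvClassify := by
    rw [List.getElem?_map, List.head?_drop]
  cases heq : ls.drop L with
  | nil =>
    have hLn : L = ls.length := by
      have := List.drop_eq_nil_iff.mp heq
      omega
    have htake' : ∀ x ∈ ls, PySem.Str.strip x = "" := by
      intro x hx
      have := htake x (by rw [hLn, List.take_length]; exact hx)
      simpa using this
    have hidx' : (ls.map pvClassify)[L]? = none := by rw [hidx, heq]; rfl
    simp only [heq, pvALoop, hidx', hLn]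
    simp [htake']
    intro hne x hx hsx
    exact absurd (htake' x hx) hsx
  | cons t ts =>
    have ht : PySem.Str.strip t ≠ "" :=
      pvALead_snd_head ls t ts (by rw [pvALead_eq]; exact heq)
    have hidx' : (ls.map pvClassify)[L]? = some (pvClassify t) := by rw [hidx, heq]; rfl
    have hL1 : ls.drop (L + 1) = ts := by
      have h := congrArg (List.drop 1) heq
      rw [List.drop_drop] at h
      simpa using h
    by_cases hf : pvClassify t = PvTag.field
    · -- first non-blank line is a header field
      have hm : pvMatched t = true := by
        by_contra hm
        rw [pvClassify_spec] at hf
        simp only [Bool.not_eq_true] at hm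
        by_cases hb : PySem.Str.strip t == "" <;> by_cases hs : PySem.Str.strip t == "---" <;>
          simp [hm, hb, hs] at hf
      have hstep : pvALoop false (t :: ts) = pvALoop true ts := by
        simp only [pvALoop]
        rw [show (pvAFieldPrefixes.any (fun p =>
            PySem.Str.startswith (PySem.Str.lower (PySem.Str.strip (PySem.Str.replace (PySem.Str.strip t) "**" ""))) p)) = pvMatched t from rfl, hm]
        rfl
      have hbeq : ((ls.map pvClassify)[L]? == some PvTag.field) = true := by
        rw [hidx', hf]; rfl
      have hdropTags : (ls.map pvClassify).drop (L + 1) = ts.map pvClassify := by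
        rw [← List.map_drop, hL1]
      have hlen : ls.length = L + 1 + ts.length := by
        have h1 := congrArg List.length heq
        rw [List.length_drop] at h1
        simp at h1
        omega
      rw [hstep, pvALoop_true_eq]
      simp only [hbeq]
      rw [if_pos trivial, hdropTags]
      cases hfi : (ts.map pvClassify).findIdx? (fun t => decide (t = PvTag.other)) with
      | none =>
        have hallb : ((ls.take L).all (fun l => PySem.Str.strip l == "")) = true := by
          rw [List.all_eq_true]; exact htake
        have hc : (L + 1 + ts.length == ls.length) = true := by simp [hlen]
        simp only [Option.map_none, Option.getD_none, List.length_map]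
        simp [hallb, hc]
      | some k =>
        obtain ⟨r, rs, hrest, hr⟩ :=
          pvALoop_some_head ts true (ts.drop k) (by intro h; cases h)
            (by rw [pvALoop_true_eq, hfi]; rfl)
        have hdrop2 : ls.drop (L + 1 + k) = ts.drop k := by
          have h := congrArg (List.drop k) hL1
          rw [List.drop_drop] at h
          exact h
        have hne : (L + 1 + k == ls.length) = false := by
          rw [beq_eq_false_iff_ne]
          intro hcontra
          have hnil : ls.drop (L + 1 + k) = [] := by rw [hcontra, List.drop_length]
          rw [hdrop2, hrest] at hnil
          cases hnil
        simp only [Option.map_some, Option.getD_some]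
        rw [hdrop2, hrest]
        simp [hr, hne]
    · -- first non-blank line is not a header field: A breaks immediately
      have hm : pvMatched t = false := by
        by_contra hm
        simp only [Bool.not_eq_false] at hm
        rw [pvClassify_spec, hm] at hf
        exact hf rfl
      have hA : pvALoop false (t :: ts) = some (t :: ts) := by
        simp only [pvALoop]
        rw [show (pvAFieldPrefixes.any (fun p =>
            PySem.Str.startswith (PySem.Str.lower (PySem.Str.strip (PySem.Str.replace (PySem.Str.strip t) "**" ""))) p)) = pvMatched t from rfl, hm]
        simp
      have hnf : ((ls.map pvClassify)[L]? == some PvTag.field) = false := by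
        rw [hidx']
        simp [hf]
      have hne : (L == ls.length) = false := by
        rw [beq_eq_false_iff_ne]
        intro hcontra
        rw [hcontra, List.drop_length] at heq
        cases heq
      rw [hA]
      simp only [hnf, Bool.false_eq_true, if_false]
      rw [← heq]
      simp [ht, hne, heq]

-- ===== VERDICT =====
theorem strip_header_block_py_spec : Claim_equal_strip_header_block_py := by
  intro content metadata _
  unfold Spec_strip_header_block_py strip_header_block_py strip_header_block_py_alt
  exact pvMain ((PySem.Str.split? content "\n").getD [])
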